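-- pv_equiv track=rewrite | github.com/Lux-01/phonics-master-pro | skills/cognitive-enhancement-layer/cel_commonsense.py | _infer_risk_context
-- ===== SOURCE A (Python) =====
-- from typing import Dict, List, Optional, Any
--
-- def _infer_risk_context(text: str) -> Optional[str]:
--     """Infer risk context."""
--     text_lower = text.lower()
--
--     risk_signals = []
--
--     if 'all in' in text_lower or 'everything' in text_lower:
--         risk_signals.append("Never risk everything on one trade")
--
--     if 'guaranteed' in text_lower or 'cant lose' in text_lower:
--         risk_signals.append("Nothing is guaranteed in trading")
--
--     if 'borrow' in text_lower or 'loan' in text_lower: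
--         risk_signals.append("Never trade with borrowed money")
--
--     if 'life savings' in text_lower:
--         risk_signals.append("Life savings should not be in speculative trades")
--
--     if risk_signals:
--         return "🛡️ **Risk Warning:**\n" + "\n".join(f"• {signal}" for signal in risk_signals)
--
--     return None
-- ===== SOURCE B (Python) =====
-- from typing import Optional
--
-- _MESSAGES = [
--     "Never risk everything on one trade",
--     "Nothing is guaranteed in trading",
--     "Never trade with borrowed money",
--     "Life savings should not be in speculative trades",
-- ]
-- _KEYWORDS = [
--     ('all in', 0), ('everything', 0),
--     ('guaranteed', 1), ('cant lose', 1),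
--     ('borrow', 2), ('loan', 2),
--     ('life savings', 3),
-- ]
--
-- def _infer_risk_context(text: str) -> Optional[str]:
--     """Single left-to-right scan: at each position, mark every keyword that
--     starts there; stop early once all four rules have fired."""
--     tl = text.lower()
--     found = [False, False, False, False]
--     for i in range(len(tl)):
--         if all(found):
--             break
--         for kw, r in _KEYWORDS:
--             if tl.startswith(kw, i):
--                 found[r] = True
--     bullets = ["• " + _MESSAGES[r] for r in range(4) if found[r]]
--     if not bullets:
--         return None
--     return "🛡️ **Risk Warning:**\n" + "\n".join(bullets)
-- ===== Notes on version B (the rewrite author's own statement) =====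
-- stated objective: alternative
-- what changed: B replaces A's seven independent substring searches (one 'in' scan per keyword) with a single left-to-right scan of the text that matches all keywords at each position into a found-flags vector with early exit once all four rules have fired, then renders the bullets from the flags.
import Mathlib
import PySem

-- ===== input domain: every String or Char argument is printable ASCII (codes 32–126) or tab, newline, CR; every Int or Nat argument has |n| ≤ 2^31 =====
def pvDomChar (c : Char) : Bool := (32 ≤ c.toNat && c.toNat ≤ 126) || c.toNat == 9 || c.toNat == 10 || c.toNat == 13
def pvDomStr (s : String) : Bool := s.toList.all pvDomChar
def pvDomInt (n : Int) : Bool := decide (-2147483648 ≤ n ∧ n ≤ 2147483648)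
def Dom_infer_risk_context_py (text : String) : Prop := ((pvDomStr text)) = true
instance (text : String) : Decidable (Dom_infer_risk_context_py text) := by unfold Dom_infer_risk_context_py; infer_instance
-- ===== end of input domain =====

-- B replaces A's seven independent substring searches with one left-to-right scan of the text
-- marking all keywords per position (early exit when all four rules fired); same output (objective: alternative).


-- ===== PORT A =====
-- Literal port of A: lower the text, append each warning under its if-guard, join.
def infer_risk_context_py (text : String) : Option String :=
  let text_lower := PySem.Str.lower text
  let risk_signals : List String := []
  let risk_signals := if PySem.Str.isIn "all in" text_lower || PySem.Str.isIn "everything" text_lower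
    then risk_signals ++ ["Never risk everything on one trade"] else risk_signals
  let risk_signals := if PySem.Str.isIn "guaranteed" text_lower || PySem.Str.isIn "cant lose" text_lower
    then risk_signals ++ ["Nothing is guaranteed in trading"] else risk_signals
  let risk_signals := if PySem.Str.isIn "borrow" text_lower || PySem.Str.isIn "loan" text_lower
    then risk_signals ++ ["Never trade with borrowed money"] else risk_signals
  let risk_signals := if PySem.Str.isIn "life savings" text_lower
    then risk_signals ++ ["Life savings should not be in speculative trades"] else risk_signals
  if risk_signals ≠ [] then
    some ("🛡️ **Risk Warning:**\n" ++ PySem.Str.join "\n" (risk_signals.map (fun signal => "• " ++ signal)))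
  else none

-- ===== PORT B =====
def riskMessages : List String :=
  [ "Never risk everything on one trade"
  , "Nothing is guaranteed in trading"
  , "Never trade with borrowed money"
  , "Life savings should not be in speculative trades" ]

-- One position of Source B's inner keyword loop: tl.startswith(kw, i) sets found[r].
def riskStep (s : List Char) (f : Bool × Bool × Bool × Bool) : Bool × Bool × Bool × Bool :=
  ( f.1 || PySem.Chars.startswith s "all in".toList || PySem.Chars.startswith s "everything".toList
  , f.2.1 || PySem.Chars.startswith s "guaranteed".toList || PySem.Chars.startswith s "cant lose".toList
  , f.2.2.1 || PySem.Chars.startswith s "borrow".toList || PySem.Chars.startswith s "loan".toList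
  , f.2.2.2 || PySem.Chars.startswith s "life savings".toList )

-- Source B's outer loop over positions (suffixes), with the all(found) early break.
def riskScan : List Char → (Bool × Bool × Bool × Bool) → (Bool × Bool × Bool × Bool)
  | [], f => f
  | c :: rest, f =>
    if f.1 && f.2.1 && f.2.2.1 && f.2.2.2 then f
    else riskScan rest (riskStep (c :: rest) f)

-- Port of B: single scan producing the flags, then bullets from the flags.
def infer_risk_context_py_alt (text : String) : Option String :=
  let tl := PySem.Chars.lower text.toList
  let f := riskScan tl (false, false, false, false)
  let flags := [f.1, f.2.1, f.2.2.1, f.2.2.2]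
  let bullets := ((flags.zip riskMessages).filter (fun p => p.1)).map (fun p => "• " ++ p.2)
  if bullets.isEmpty then none
  else some ("🛡️ **Risk Warning:**\n" ++ PySem.Str.join "\n" bullets)

-- ===== PRECONDITION & SPEC =====
def Spec_infer_risk_context_py (text : String) (out : Option String) : Prop := out = infer_risk_context_py_alt text
instance (text : String) (out : Option String) : Decidable (Spec_infer_risk_context_py text out) := by unfold Spec_infer_risk_context_py; infer_instance

-- ===== CLAIM (what is proved, stated in full; the proofs are below) =====
def Claim_equal_infer_risk_context_py : Prop := ∀ (text : String), Dom_infer_risk_context_py text → Spec_infer_risk_context_py text (infer_risk_context_py text)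

-- ===== LEMMAS AND PROOFS =====

-- 'sub in (c :: cs)' = 'sub starts at 0' or 'sub in cs' — the step Source B's scan takes.
lemma isIn_cons (sub : List Char) (c : Char) (cs : List Char) :
    PySem.Chars.isIn sub (c :: cs)
      = (PySem.Chars.startswith (c :: cs) sub || PySem.Chars.isIn sub cs) := by
  rw [Bool.eq_iff_iff]
  simp [PySem.Chars.isIn_iff_infix, PySem.Chars.startswith_iff, List.infix_cons_iff]

-- The scan computes, per rule, the disjunction of 'keyword in s' over its keywords.
lemma riskScan_eq (s : List Char) (f : Bool × Bool × Bool × Bool) :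
    riskScan s f
      = ( f.1 || PySem.Chars.isIn "all in".toList s || PySem.Chars.isIn "everything".toList s
        , f.2.1 || PySem.Chars.isIn "guaranteed".toList s || PySem.Chars.isIn "cant lose".toList s
        , f.2.2.1 || PySem.Chars.isIn "borrow".toList s || PySem.Chars.isIn "loan".toList s
        , f.2.2.2 || PySem.Chars.isIn "life savings".toList s ) := by
  have e1 : PySem.Chars.isIn ['a','l','l',' ','i','n'] ([] : List Char) = false := by decide
  have e2 : PySem.Chars.isIn ['e','v','e','r','y','t','h','i','n','g'] ([] : List Char) = false := by decide
  have e3 : PySem.Chars.isIn ['g','u','a','r','a','n','t','e','e','d'] ([] : List Char) = false := by decide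
  have e4 : PySem.Chars.isIn ['c','a','n','t',' ','l','o','s','e'] ([] : List Char) = false := by decide
  have e5 : PySem.Chars.isIn ['b','o','r','r','o','w'] ([] : List Char) = false := by decide
  have e6 : PySem.Chars.isIn ['l','o','a','n'] ([] : List Char) = false := by decide
  have e7 : PySem.Chars.isIn ['l','i','f','e',' ','s','a','v','i','n','g','s'] ([] : List Char) = false := by decide
  induction s generalizing f with
  | nil =>
    obtain ⟨a, b, c, d⟩ := f
    simp [riskScan, e1, e2, e3, e4, e5, e6, e7]
  | cons c rest ih =>
    obtain ⟨a, b, cc, d⟩ := f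
    rw [riskScan]
    split_ifs with h
    · simp only [Bool.and_eq_true] at h
      obtain ⟨⟨⟨h1, h2⟩, h3⟩, h4⟩ := h
      subst h1 h2 h3 h4
      simp
    · rw [ih, riskStep]
      simp only [isIn_cons]
      refine Prod.ext ?_ (Prod.ext ?_ (Prod.ext ?_ ?_)) <;> simp <;> ac_rfl

-- ===== VERDICT (by name: the statement is the Claim_ definition above) =====
theorem infer_risk_context_py_spec : Claim_equal_infer_risk_context_py := by
  intro text _
  unfold Spec_infer_risk_context_py infer_risk_context_py infer_risk_context_py_alt riskMessages
  simp only [riskScan_eq]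
  cases h1 : (PySem.Chars.isIn ['a','l','l',' ','i','n'] (PySem.Chars.lower text.toList) ||
      PySem.Chars.isIn ['e','v','e','r','y','t','h','i','n','g'] (PySem.Chars.lower text.toList)) <;>
  cases h2 : (PySem.Chars.isIn ['g','u','a','r','a','n','t','e','e','d'] (PySem.Chars.lower text.toList) ||
      PySem.Chars.isIn ['c','a','n','t',' ','l','o','s','e'] (PySem.Chars.lower text.toList)) <;>
  cases h3 : (PySem.Chars.isIn ['b','o','r','r','o','w'] (PySem.Chars.lower text.toList) ||
      PySem.Chars.isIn ['l','o','a','n'] (PySem.Chars.lower text.toList)) <;>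
  cases h4 : PySem.Chars.isIn ['l','i','f','e',' ','s','a','v','i','n','g','s'] (PySem.Chars.lower text.toList) <;>
    simp [h1, h2, h3, h4]
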